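-- pv_equiv track=rewrite | github.com/UndergraduateArtificialIntelligenceClub/puzzles | socialdistancing.py | gen_move
-- ===== SOURCE A (Python) =====
-- def gen_move(IC, max_elements):
-- 	best_value=-1
-- 	best_index=None
-- 	for i in range(max_elements):
-- 		if i not in IC:
-- 			difference=max([abs(i-s) for s in IC])
-- 			if difference>best_value:
-- 				best_value=difference
-- 				best_index=i
-- 	return best_index
-- ===== SOURCE B (Python) =====
-- def gen_move(IC, max_elements):
--     # The farthest-from-IC point of a range is at one of the two extreme free
--     # slots: distance max(|i-s|) = max(i-min(IC), max(IC)-i) is V-shaped in i.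
--     members = set(IC)
--     a = 0
--     while a < max_elements and a in members:
--         a += 1
--     if a >= max_elements:
--         return None
--     lo, hi = min(IC), max(IC)
--     b = max_elements - 1
--     while b in members:
--         b -= 1
--     fa = max(a - lo, hi - a)
--     fb = max(b - lo, hi - b)
--     return a if fa >= fb else b
-- ===== Notes on version B (the rewrite author's own statement) =====
-- stated objective: faster
-- what changed: B replaces A's scan of all max_elements slots with an inner max-over-IC pass by: membership set, precomputed min/max of IC, and the observation that the distance function max(i-min, max-i) is V-shaped, so only the first and last free slots need to be compared.
import Mathlib
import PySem

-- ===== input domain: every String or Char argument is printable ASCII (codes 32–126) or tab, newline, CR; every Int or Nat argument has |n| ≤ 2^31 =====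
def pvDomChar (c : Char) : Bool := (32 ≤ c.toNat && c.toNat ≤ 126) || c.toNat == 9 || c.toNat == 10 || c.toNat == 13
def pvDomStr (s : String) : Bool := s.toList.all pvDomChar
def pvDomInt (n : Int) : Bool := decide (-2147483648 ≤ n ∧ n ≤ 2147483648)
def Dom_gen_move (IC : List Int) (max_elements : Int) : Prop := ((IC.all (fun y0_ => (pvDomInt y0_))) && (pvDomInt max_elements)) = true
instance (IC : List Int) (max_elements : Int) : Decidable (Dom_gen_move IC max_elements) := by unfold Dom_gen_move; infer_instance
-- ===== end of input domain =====

-- B replaces A's per-slot inner max-over-IC scan by precomputed min/max of IC and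
-- compares only the first and last free slots (the distance function is V-shaped).

-- ===== PORT A =====
-- loop body of A's for-loop over range(max_elements)
def stepA (IC : List Int) (st : Int × Option Int) (i : Int) : Int × Option Int :=
  if IC.contains i then st
  else
    -- Python max([...]) raises ValueError on empty IC; the .getD (-1) default is unreachable under Pre_
    let difference := (PySem.List.max? (IC.map fun s => |i - s|) (fun y => y)).getD (-1)
    if difference > st.1 then (difference, some i) else st

def gen_move (IC : List Int) (max_elements : Int) : Option Int :=
  ((PySem.List.pyRange 0 max_elements 1).foldl (stepA IC) ((-1 : Int), (none : Option Int))).2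

-- ===== PORT B =====
-- while a < max_elements and a in members: a += 1
def findAfree (members : List Int) (m a : Int) : Option Int :=
  if h : a < m then
    if members.contains a then findAfree members m (a + 1) else some a
  else none
termination_by (m - a).toNat
decreasing_by omega

-- while b in members: b -= 1  (the 0 ≤ b test only makes the recursion total;
-- it is never reached when a free slot exists at or below b)
def findBfree (members : List Int) (b : Int) : Int :=
  if h : 0 ≤ b then
    if members.contains b then findBfree members (b - 1) else b
  else b
termination_by (b + 1).toNat
decreasing_by omega

def gen_move_alt (IC : List Int) (max_elements : Int) : Option Int :=
  let members := PySem.Set.ofList IC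
  match findAfree members max_elements 0 with
  | none => none
  | some a =>
    -- Python min([])/max([]) raise ValueError on empty IC; the .getD 0 defaults are unreachable under Pre_
    let lo := (PySem.List.min? IC (fun y => y)).getD 0
    let hi := (PySem.List.max? IC (fun y => y)).getD 0
    let b := findBfree members (max_elements - 1)
    let fa := max (a - lo) (hi - a)
    let fb := max (b - lo) (hi - b)
    some (if fa ≥ fb then a else b)

-- ===== PRECONDITION & SPEC =====
-- Pre_ excludes IC = [] with max_elements > 0, where both A (max([])) and B (min([])) raise ValueError.
def Pre_gen_move (IC : List Int) (max_elements : Int) : Prop := IC ≠ [] ∨ max_elements ≤ 0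
instance (IC : List Int) (max_elements : Int) : Decidable (Pre_gen_move IC max_elements) := by unfold Pre_gen_move; infer_instance
def pvWitness_gen_move : List Int × Int := ([0, 4], 6)

def Spec_gen_move (IC : List Int) (max_elements : Int) (out : Option Int) : Prop := out = gen_move_alt IC max_elements
instance (IC : List Int) (max_elements : Int) (out : Option Int) : Decidable (Spec_gen_move IC max_elements out) := by unfold Spec_gen_move; infer_instance

-- ===== CLAIM (what is proved, stated in full; the proofs are below) =====
def Claim_equal_gen_move : Prop := ∀ (IC : List Int) (max_elements : Int), Dom_gen_move IC max_elements → Pre_gen_move IC max_elements → Spec_gen_move IC max_elements (gen_move IC max_elements)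

-- ===== LEMMAS AND PROOFS =====

-- the distance of slot i to the interval [lo, hi]'s far end
def fV (lo hi i : Int) : Int := max (i - lo) (hi - i)

theorem contains_ofList (IC : List Int) (i : Int) :
    List.contains (PySem.Set.ofList IC) i = true ↔ i ∈ IC := by
  have h := PySem.Set.mem_ofList IC i
  constructor
  · intro hc
    exact h.mp (by simpa using hc)
  · intro hm
    simpa using h.mpr hm

theorem minmax_spec (IC : List Int) (hIC : IC ≠ []) :
    ∃ lo hi, PySem.List.min? IC (fun y => y) = some lo ∧
      PySem.List.max? IC (fun y => y) = some hi ∧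
      lo ∈ IC ∧ hi ∈ IC ∧ ∀ s ∈ IC, lo ≤ s ∧ s ≤ hi := by
  cases hmin : PySem.List.min? IC (fun y => y) with
  | none => exact absurd ((PySem.List.min?_eq_none_iff IC (fun y => y)).mp hmin) hIC
  | some lo =>
    cases hmax : PySem.List.max? IC (fun y => y) with
    | none => exact absurd ((PySem.List.max?_eq_none_iff IC (fun y => y)).mp hmax) hIC
    | some hi =>
      refine ⟨lo, hi, rfl, rfl, PySem.List.min?_mem hmin, PySem.List.max?_mem hmax, fun s hs => ?_⟩
      exact ⟨PySem.List.min?_isMin hmin s hs, PySem.List.max?_isMax hmax s hs⟩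

theorem maxabs (IC : List Int) (i lo hi : Int)
    (hlom : lo ∈ IC) (hhim : hi ∈ IC) (hb : ∀ s ∈ IC, lo ≤ s ∧ s ≤ hi) :
    (PySem.List.max? (IC.map fun s => |i - s|) (fun y => y)).getD (-1) = fV lo hi i := by
  cases hv : PySem.List.max? (IC.map fun s => |i - s|) (fun y => y) with
  | none =>
    have : IC.map (fun s => |i - s|) = [] := (PySem.List.max?_eq_none_iff _ _).mp hv
    simp at this
    subst this
    simp at hlom
  | some v =>
    obtain ⟨s, hs, hsv⟩ := List.mem_map.mp (PySem.List.max?_mem hv)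
    have h1 : |i - lo| ≤ v := PySem.List.max?_isMax hv _ (List.mem_map_of_mem hlom)
    have h2 : |i - hi| ≤ v := PySem.List.max?_isMax hv _ (List.mem_map_of_mem hhim)
    have hsb := hb s hs
    simp only [Option.getD_some]
    unfold fV
    rcases abs_cases (i - s) with ⟨e1, _⟩ | ⟨e1, _⟩ <;>
      rcases abs_cases (i - lo) with ⟨e2, _⟩ | ⟨e2, _⟩ <;>
      rcases abs_cases (i - hi) with ⟨e3, _⟩ | ⟨e3, _⟩ <;>
      simp only [Int.max_def] <;> split_ifs <;> omega

-- the running strict-argmax invariant of A's loop over range(0, k)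
def GoodA (IC : List Int) (lo hi k : Int) (st : Int × Option Int) : Prop :=
  ((∀ i : Int, 0 ≤ i → i < k → i ∈ IC) ∧ st = (-1, none)) ∨
  (∃ j, st = (fV lo hi j, some j) ∧ 0 ≤ j ∧ j < k ∧ j ∉ IC ∧
    (∀ i : Int, 0 ≤ i → i < k → i ∉ IC → fV lo hi i ≤ fV lo hi j) ∧
    (∀ i : Int, 0 ≤ i → i < j → i ∉ IC → fV lo hi i < fV lo hi j))

theorem loopA (IC : List Int) (lo hi : Int)
    (hmaxf : ∀ i : Int, (PySem.List.max? (IC.map fun s => |i - s|) (fun y => y)).getD (-1) = fV lo hi i)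
    (hlohi : lo ≤ hi) :
    ∀ k : Nat, GoodA IC lo hi k (List.foldl (stepA IC) ((-1 : Int), (none : Option Int)) (PySem.List.pyRange 0 k 1)) := by
  intro k
  induction k with
  | zero =>
    rw [PySem.List.pyRange_one_eq_nil (by norm_num)]
    exact Or.inl ⟨fun i h1 h2 => absurd h2 (by omega), rfl⟩
  | succ k ih =>
    have hsplit : PySem.List.pyRange 0 ((k + 1 : Nat) : Int) 1
        = PySem.List.pyRange 0 (k : Int) 1 ++ [(k : Int)] := by
      push_cast
      exact PySem.List.pyRange_one_succ_right (by positivity)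
    rw [hsplit, List.foldl_append, List.foldl_cons, List.foldl_nil]
    set st := List.foldl (stepA IC) ((-1 : Int), (none : Option Int)) (PySem.List.pyRange 0 (k : Int) 1) with hstdef
    by_cases hm : (k : Int) ∈ IC
    · have hc : IC.contains (k : Int) = true := by simpa using hm
      rw [show stepA IC st (k : Int) = st from by unfold stepA; rw [if_pos hc]]
      rcases ih with ⟨hall, hst⟩ | ⟨j, hst, hj0, hjk, hjni, hmaxj, hstrict⟩
      · refine Or.inl ⟨fun i h1 h2 => ?_, hst⟩
        rcases lt_or_ge i (k : Int) with h | h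
        · exact hall i h1 h
        · have : i = (k : Int) := by push_cast at h2 ⊢; omega
          subst this; exact hm
      · refine Or.inr ⟨j, hst, hj0, by push_cast; omega, hjni, fun i h1 h2 h3 => ?_, hstrict⟩
        rcases lt_or_ge i (k : Int) with h | h
        · exact hmaxj i h1 h h3
        · have : i = (k : Int) := by push_cast at h2 ⊢; omega
          subst this; exact absurd hm h3
    · have hc : IC.contains (k : Int) = false := by simpa using hm
      have hstep : stepA IC st (k : Int)
          = if fV lo hi (k : Int) > st.1 then (fV lo hi (k : Int), some (k : Int)) else st := by
        unfold stepA
        rw [if_neg (by rw [hc]; exact Bool.false_ne_true), hmaxf (k : Int)]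
      rw [hstep]
      rcases ih with ⟨hall, hst⟩ | ⟨j, hst, hj0, hjk, hjni, hmaxj, hstrict⟩
      · have hpos : fV lo hi (k : Int) ≥ 0 := by
          unfold fV; simp only [Int.max_def]; split_ifs <;> omega
        rw [hst, if_pos (by simpa using by omega : fV lo hi (k : Int) > ((-1 : Int), (none : Option Int)).1)]
        refine Or.inr ⟨(k : Int), rfl, by positivity, by push_cast; omega, hm, fun i h1 h2 h3 => ?_, fun i h1 h2 h3 => ?_⟩
        · rcases lt_or_ge i (k : Int) with h | h
          · exact absurd (hall i h1 h) h3
          · have : i = (k : Int) := by push_cast at h2 ⊢; omega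
            subst this; exact le_refl _
        · exact absurd (hall i h1 h2) h3
      · rw [hst]
        by_cases hgt : fV lo hi (k : Int) > fV lo hi j
        · rw [if_pos (by simpa using hgt)]
          refine Or.inr ⟨(k : Int), rfl, by positivity, by push_cast; omega, hm, fun i h1 h2 h3 => ?_, fun i h1 h2 h3 => ?_⟩
          · rcases lt_or_ge i (k : Int) with h | h
            · exact le_of_lt (lt_of_le_of_lt (hmaxj i h1 h h3) hgt)
            · have : i = (k : Int) := by push_cast at h2 ⊢; omega
              subst this; exact le_refl _
          · exact lt_of_le_of_lt (hmaxj i h1 h2 h3) hgt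
        · rw [if_neg (by simpa using hgt)]
          refine Or.inr ⟨j, rfl, hj0, by push_cast; omega, hjni, fun i h1 h2 h3 => ?_, hstrict⟩
          rcases lt_or_ge i (k : Int) with h | h
          · exact hmaxj i h1 h h3
          · have : i = (k : Int) := by push_cast at h2 ⊢; omega
            subst this; omega

theorem findA_none (members : List Int) (m a : Int) :
    findAfree members m a = none → ∀ i, a ≤ i → i < m → members.contains i = true := by
  induction a using findAfree.induct members m with
  | case1 a hlt hc ih =>
    intro h i h1 h2
    rw [findAfree, dif_pos hlt, if_pos hc] at h
    rcases eq_or_lt_of_le h1 with he | hl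
    · subst he; exact hc
    · exact ih h i (by omega) h2
  | case2 a hlt hc =>
    intro h
    rw [findAfree, dif_pos hlt, if_neg hc] at h
    exact absurd h (by simp)
  | case3 a hlt =>
    intro _ i h1 h2
    exact absurd h2 (by omega)

theorem findA_some (members : List Int) (m a : Int) : ∀ a' : Int,
    findAfree members m a = some a' →
    a ≤ a' ∧ a' < m ∧ members.contains a' = false ∧
      ∀ i, a ≤ i → i < a' → members.contains i = true := by
  induction a using findAfree.induct members m with
  | case1 a hlt hc ih =>
    intro a' h
    rw [findAfree, dif_pos hlt, if_pos hc] at h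
    obtain ⟨p1, p2, p3, p4⟩ := ih a' h
    refine ⟨by omega, p2, p3, fun i h1 h2 => ?_⟩
    rcases eq_or_lt_of_le h1 with he | hl
    · subst he; exact hc
    · exact p4 i (by omega) h2
  | case2 a hlt hc =>
    intro a' h
    rw [findAfree, dif_pos hlt, if_neg hc] at h
    obtain rfl : a = a' := by simpa using h
    exact ⟨le_refl _, hlt, by simpa using hc, fun i h1 h2 => absurd h2 (by omega)⟩
  | case3 a hlt =>
    intro a' h
    rw [findAfree, dif_neg hlt] at h
    exact absurd h (by simp)

theorem findB_spec (members : List Int) (b : Int) :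
    (∃ i, 0 ≤ i ∧ i ≤ b ∧ members.contains i = false) →
    0 ≤ findBfree members b ∧ findBfree members b ≤ b ∧
      members.contains (findBfree members b) = false ∧
      ∀ i, findBfree members b < i → i ≤ b → members.contains i = true := by
  induction b using findBfree.induct members with
  | case1 b hb hc ih =>
    intro ⟨w, hw0, hwb, hwc⟩
    have hwb' : w ≤ b - 1 := by
      rcases eq_or_lt_of_le hwb with he | hl
      · subst he; rw [hwc] at hc; exact absurd hc (by simp)
      · omega
    obtain ⟨p1, p2, p3, p4⟩ := ih ⟨w, hw0, hwb', hwc⟩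
    rw [findBfree, dif_pos hb, if_pos hc]
    refine ⟨p1, by omega, p3, fun i h1 h2 => ?_⟩
    rcases eq_or_lt_of_le h2 with he | hl
    · subst he; exact hc
    · exact p4 i h1 (by omega)
  | case2 b hb hc =>
    intro _
    rw [findBfree, dif_pos hb, if_neg hc]
    exact ⟨hb, le_refl _, by simpa using hc, fun i h1 h2 => absurd h2 (by omega)⟩
  | case3 b hb =>
    intro ⟨w, hw0, hwb, _⟩
    exact absurd hwb (by omega)

-- ===== VERDICT (by name: the statement is the Claim_ definition above) =====
theorem gen_move_spec : Claim_equal_gen_move := by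
  unfold Claim_equal_gen_move Spec_gen_move
  intro IC m _hDom hPre
  by_cases hm : m ≤ 0
  · have h1 : gen_move IC m = none := by
      unfold gen_move
      rw [PySem.List.pyRange_one_eq_nil (by omega)]
      rfl
    have h2 : gen_move_alt IC m = none := by
      simp only [gen_move_alt]
      rw [show findAfree (PySem.Set.ofList IC) m 0 = none from by
        rw [findAfree, dif_neg (by omega)]]
    rw [h1, h2]
  · have hIC : IC ≠ [] := by
      rcases hPre with h | h
      · exact h
      · omega
    obtain ⟨lo, hi, hlo, hhi, hlom, hhim, hb⟩ := minmax_spec IC hIC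
    have hlohi : lo ≤ hi := (hb lo hlom).2
    have hmaxf : ∀ i : Int, (PySem.List.max? (IC.map fun s => |i - s|) (fun y => y)).getD (-1) = fV lo hi i :=
      fun i => maxabs IC i lo hi hlom hhim hb
    have hcont : ∀ i : Int, List.contains (PySem.Set.ofList IC) i = true ↔ i ∈ IC := contains_ofList IC
    obtain ⟨k, hk⟩ : ∃ k : Nat, (k : Int) = m := ⟨m.toNat, by omega⟩
    have hG := loopA IC lo hi hmaxf hlohi k
    rw [hk] at hG
    have hA : gen_move IC m = (List.foldl (stepA IC) ((-1 : Int), (none : Option Int)) (PySem.List.pyRange 0 m 1)).2 := rfl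
    cases hfa : findAfree (PySem.Set.ofList IC) m 0 with
    | none =>
      have hall := findA_none (PySem.Set.ofList IC) m 0 hfa
      rcases hG with ⟨_, hst⟩ | ⟨j, _, hj0, hjm, hjni, _, _⟩
      · rw [hA, hst]
        simp only [gen_move_alt]
        rw [hfa]
      · exact absurd ((hcont j).mp (hall j hj0 hjm)) hjni
    | some a =>
      obtain ⟨ha0, ham, hacont, hafirst⟩ := findA_some (PySem.Set.ofList IC) m 0 a hfa
      have haIC : a ∉ IC := fun h => by rw [(hcont a).mpr h] at hacont; exact absurd hacont (by simp)
      have hAlt : gen_move_alt IC m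
          = some (if max (a - lo) (hi - a) ≥ max ((findBfree (PySem.Set.ofList IC) (m - 1)) - lo) (hi - (findBfree (PySem.Set.ofList IC) (m - 1))) then a else findBfree (PySem.Set.ofList IC) (m - 1)) := by
        simp only [gen_move_alt]
        rw [hfa, hlo, hhi]
        rfl
      rcases hG with ⟨hall, _⟩ | ⟨j, hst, hj0, hjm, hjni, hmaxj, hstrict⟩
      · exact absurd (hall a ha0 ham) haIC
      · have hjcont : (PySem.Set.ofList IC).contains j = false := by
          cases h : (PySem.Set.ofList IC).contains j
          · rfl
          · exact absurd ((hcont j).mp h) hjni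
        have hbex : ∃ i, 0 ≤ i ∧ i ≤ m - 1 ∧ List.contains (PySem.Set.ofList IC) i = false :=
          ⟨j, hj0, by omega, hjcont⟩
        obtain ⟨hb0, hbm, hbcont, hblast⟩ := findB_spec (PySem.Set.ofList IC) (m - 1) hbex
        set b := findBfree (PySem.Set.ofList IC) (m - 1) with hbdef
        have hbIC : b ∉ IC := fun h => by rw [(hcont b).mpr h] at hbcont; exact absurd hbcont (by simp)
        have haj : a ≤ j := by
          by_contra h
          exact absurd ((hcont j).mp (hafirst j hj0 (by omega))) hjni
        have hjb : j ≤ b := by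
          by_contra h
          exact absurd ((hcont j).mp (hblast j (by omega) (by omega))) hjni
        have hfaj : fV lo hi a ≤ fV lo hi j := hmaxj a ha0 (by omega) haIC
        have hfbj : fV lo hi b ≤ fV lo hi j := hmaxj b hb0 (by omega) hbIC
        rw [hA, hst, hAlt]
        simp only [Option.some.injEq]
        by_cases hcase : max (a - lo) (hi - a) ≥ max (b - lo) (hi - b)
        · rw [if_pos hcase]
          by_contra hne
          have haltj : a < j := lt_of_le_of_ne haj (Ne.symm hne)
          have hsa := hstrict a ha0 haltj haIC
          unfold fV at hfaj hfbj hsa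
          simp only [Int.max_def] at hfaj hfbj hsa hcase
          split_ifs at hfaj hfbj hsa hcase <;> omega
        · rw [if_neg hcase]
          by_contra hne
          have hjltb : j < b := lt_of_le_of_ne hjb hne
          unfold fV at hfaj hfbj
          simp only [Int.max_def] at hfaj hfbj hcase
          split_ifs at hfaj hfbj hcase <;> omega
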